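-- pv_equiv track=rewrite | github.com/evgenyigumnov/ai-asset-screener | app/edgar_extractor.py | find_pipe_block_tables
-- ===== SOURCE A (Python) =====
-- from typing import List, Dict, Any, Tuple, Optional
--
-- def find_pipe_block_tables(lines: List[str]) -> List[Tuple[int, int]]:
--     """
--     Fallback: находим блоки из >=3 подряд идущих строк, содержащих минимум по 2 '|'.
--     Полезно для 10-K, где нет markdown-разделителя '---'.
--     """
--     res = []
--     n = len(lines)
--     i = 0
--     while i < n:
--         line = lines[i]
--         if line.count('|') >= 2:
--             start = i
--             j = i + 1
--             rows = 1
--             while j < n and lines[j].count('|') >= 2: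
--                 rows += 1
--                 j += 1
--             if rows >= 3:
--                 res.append((start, j - 1))
--             i = j
--         else:
--             i += 1
--     return res
-- ===== SOURCE B (Python) =====
-- def find_pipe_block_tables(lines):
--     """Single right-to-left pass with a run counter: a run's length is known
--     the moment we step off its left edge, so no inner loop / index jumping."""
--     rev = []
--     run = 0
--     for i in range(len(lines) - 1, -1, -1):
--         if lines[i].count('|') >= 2:
--             run += 1
--         else:
--             if run >= 3:
--                 rev.append((i + 1, i + run))
--             run = 0
--     if run >= 3:
--         rev.append((0, run - 1))
--     rev.reverse()
--     return rev
-- ===== Notes on version B (the rewrite author's own statement) =====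
-- stated objective: alternative
-- what changed: Replaced A's nested while-loops with index jumping by a single right-to-left pass that keeps a run counter and emits a block the moment the left edge of a >=3 run is passed.
import Mathlib
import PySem

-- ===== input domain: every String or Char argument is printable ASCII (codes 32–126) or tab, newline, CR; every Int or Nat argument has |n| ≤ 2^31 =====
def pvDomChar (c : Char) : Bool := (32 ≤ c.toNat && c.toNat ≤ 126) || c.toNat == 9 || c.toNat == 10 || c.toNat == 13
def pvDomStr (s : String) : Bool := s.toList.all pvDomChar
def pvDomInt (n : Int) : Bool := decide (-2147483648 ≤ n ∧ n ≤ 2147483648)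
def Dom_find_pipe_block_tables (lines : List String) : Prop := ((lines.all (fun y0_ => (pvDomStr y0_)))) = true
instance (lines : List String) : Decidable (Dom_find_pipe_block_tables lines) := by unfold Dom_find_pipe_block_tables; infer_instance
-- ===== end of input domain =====

-- B replaces A's nested while-loops (inner scan + index jump) by one right-to-left
-- pass with a run counter; same result, same asymptotic cost (objective: alternative).

-- line.count('|') >= 2 — the same Python expression appears in both sources
def pvHasPipes (s : String) : Bool := 2 ≤ PySem.Str.count s "|"

-- ===== PORT A =====
-- inner while: 'while j < n and lines[j].count('|') >= 2: rows += 1; j += 1'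
-- returns (j, rows, remaining suffix of lines starting at j)
def pvInner : List String → Int → Int → Int × Int × List String
  | [], j, rows => (j, rows, [])
  | l :: rest, j, rows =>
      if pvHasPipes l then pvInner rest (j + 1) (rows + 1)
      else (j, rows, l :: rest)

-- termination helper for the outer loop (the suffix is no longer than the input)
theorem pvInner_length_le : ∀ (xs : List String) (j rows : Int),
    ((pvInner xs j rows).2.2).length ≤ xs.length := by
  intro xs
  induction xs with
  | nil => intro j rows; simp [pvInner]
  | cons l rest ih =>
      intro j rows
      by_cases h : pvHasPipes l = true
      · simp only [pvInner, h, if_pos]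
        exact Nat.le_trans (ih (j + 1) (rows + 1)) (Nat.le_succ _)
      · simp [pvInner, h]

-- outer while over i; the list argument is lines[i:]
def pvALoop : List String → Int → List (Int × Int)
  | [], _ => []
  | l :: rest, i =>
      if pvHasPipes l then
        let r := pvInner rest (i + 1) 1
        (if 3 ≤ r.2.1 then [(i, r.1 - 1)] else []) ++ pvALoop r.2.2 r.1
      else
        pvALoop rest (i + 1)
termination_by xs _ => xs.length
decreasing_by
  · exact Nat.lt_succ_of_le (pvInner_length_le rest (i + 1) 1)
  · simp

def find_pipe_block_tables (lines : List String) : List (Int × Int) :=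
  pvALoop lines 0

-- ===== PORT B =====
-- the reversed for-loop of Source B: state (run, rev), processing indices n-1 … 0;
-- formulated as structural recursion (the tail — the lines to the right — is
-- processed first, exactly as the loop has already processed them)
def pvBGo : List String → Int → Int × List (Int × Int)
  | [], _ => (0, [])
  | l :: rest, i =>
      let s := pvBGo rest (i + 1)
      if pvHasPipes l then (s.1 + 1, s.2)
      else (0, if 3 ≤ s.1 then s.2 ++ [(i + 1, i + s.1)] else s.2)

def find_pipe_block_tables_alt (lines : List String) : List (Int × Int) :=
  let s := pvBGo lines 0
  (if 3 ≤ s.1 then s.2 ++ [(0, s.1 - 1)] else s.2).reverse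

-- ===== PRECONDITION & SPEC =====
def Spec_find_pipe_block_tables (lines : List String) (out : List (Int × Int)) : Prop := out = find_pipe_block_tables_alt lines
instance (lines : List String) (out : List (Int × Int)) : Decidable (Spec_find_pipe_block_tables lines out) := by unfold Spec_find_pipe_block_tables; infer_instance

-- ===== CLAIM (what is proved, stated in full; the proofs are below) =====
def Claim_equal_find_pipe_block_tables : Prop := ∀ (lines : List String), Dom_find_pipe_block_tables lines → Spec_find_pipe_block_tables lines (find_pipe_block_tables lines)

-- ===== LEMMAS AND PROOFS =====

-- proof-side helper: pvBGo with blocks PREPENDED (so no final reverse is needed)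
def pvGo : List String → Int → Int × List (Int × Int)
  | [], _ => (0, [])
  | l :: rest, i =>
      let s := pvGo rest (i + 1)
      if pvHasPipes l then (s.1 + 1, s.2)
      else (0, if 3 ≤ s.1 then (i + 1, i + s.1) :: s.2 else s.2)

theorem pvBGo_eq (xs : List String) : ∀ i : Int,
    pvBGo xs i = ((pvGo xs i).1, (pvGo xs i).2.reverse) := by
  induction xs with
  | nil => intro i; simp [pvBGo, pvGo]
  | cons l rest ih =>
      intro i
      by_cases h : pvHasPipes l = true
      · simp [pvBGo, pvGo, h, ih]
      · simp only [pvBGo, pvGo, h, if_neg, Bool.false_eq_true, not_false_iff]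
        rw [ih]
        by_cases h3 : 3 ≤ (pvGo rest (i + 1)).1
        · simp [h3]
        · simp [h3]

theorem pvInner_eq (xs : List String) : ∀ (j rows : Int),
    pvInner xs j rows =
      (j + ((xs.takeWhile pvHasPipes).length : Int),
       rows + ((xs.takeWhile pvHasPipes).length : Int),
       xs.drop (xs.takeWhile pvHasPipes).length) := by
  induction xs with
  | nil => intro j rows; simp [pvInner]
  | cons l rest ih =>
      intro j rows
      by_cases h : pvHasPipes l = true
      · simp only [pvInner, h, if_pos, List.takeWhile_cons_of_pos h,
          List.length_cons, List.drop_succ_cons]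
        rw [ih]
        refine Prod.ext ?_ (Prod.ext ?_ rfl)
        · push_cast; ring
        · push_cast; ring
      · simp [pvInner, h, List.takeWhile_cons_of_neg h]

theorem pvGo_fst (xs : List String) : ∀ i : Int,
    (pvGo xs i).1 = ((xs.takeWhile pvHasPipes).length : Int) := by
  induction xs with
  | nil => intro i; simp [pvGo]
  | cons l rest ih =>
      intro i
      by_cases h : pvHasPipes l = true
      · simp [pvGo, h, List.takeWhile_cons_of_pos h, ih]
      · simp [pvGo, h, List.takeWhile_cons_of_neg h]

theorem pvGo_drop (xs : List String) : ∀ i : Int,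
    pvGo (xs.drop (xs.takeWhile pvHasPipes).length) (i + ((xs.takeWhile pvHasPipes).length : Int))
      = (0, (pvGo xs i).2) := by
  induction xs with
  | nil => intro i; simp [pvGo]
  | cons l rest ih =>
      intro i
      by_cases h : pvHasPipes l = true
      · have ht : (l :: rest).takeWhile pvHasPipes = l :: rest.takeWhile pvHasPipes :=
          List.takeWhile_cons_of_pos h
        rw [ht]
        simp only [List.drop_succ_cons, List.length_cons]
        rw [show i + ((((rest.takeWhile pvHasPipes).length + 1 : Nat)) : Int)
              = (i + 1) + ((rest.takeWhile pvHasPipes).length : Int) by push_cast; ring]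
        rw [ih (i + 1)]
        simp [pvGo, h]
      · have ht : (l :: rest).takeWhile pvHasPipes = [] :=
          List.takeWhile_cons_of_neg (by simp [h])
        rw [ht]
        simp only [List.length_nil, List.drop_zero, Nat.cast_zero, add_zero]
        simp [pvGo, h]

-- the wrap applied at the top level (and after each non-pipe line)
def pvWrap (i : Int) (s : Int × List (Int × Int)) : List (Int × Int) :=
  if 3 ≤ s.1 then (i, i + s.1 - 1) :: s.2 else s.2

theorem pvALoop_eq_go : ∀ (n : Nat) (xs : List String) (i : Int), xs.length = n →
    pvALoop xs i = pvWrap i (pvGo xs i) := by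
  intro n
  induction n using Nat.strong_induction_on with
  | _ n ih =>
      intro xs i hlen
      match xs with
      | [] => simp [pvALoop, pvGo, pvWrap]
      | l :: rest =>
          by_cases h : pvHasPipes l = true
          · rw [pvALoop]
            simp only [h, if_pos]
            rw [pvInner_eq]
            set t := (rest.takeWhile pvHasPipes).length with htdef
            have hdroplen : (rest.drop t).length < n := by
              have h1 : (rest.drop t).length ≤ rest.length := by
                simp
              have h2 : rest.length + 1 = n := by simpa using hlen
              omega
            have hrec : pvALoop (rest.drop t) ((i + 1) + (t : Int))
                = pvWrap ((i + 1) + (t : Int)) (pvGo (rest.drop t) ((i + 1) + (t : Int))) :=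
              ih _ hdroplen _ _ rfl
            have hz := pvGo_drop rest (i + 1)
            rw [← htdef] at hz
            -- A side: block (i, i+1+t-1) if 3 ≤ 1+t, then continue on the dropped suffix
            have hcont : pvALoop (rest.drop t) ((i + 1) + (t : Int)) = (pvGo rest (i + 1)).2 := by
              rw [hrec, hz, pvWrap]; norm_num
            -- B side
            have hbg : pvGo (l :: rest) i = ((pvGo rest (i + 1)).1 + 1, (pvGo rest (i + 1)).2) := by
              simp [pvGo, h]
            rw [hbg, pvWrap]
            have hfst : (pvGo rest (i + 1)).1 = (t : Int) := pvGo_fst rest (i + 1)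
            simp only [hfst, hcont]
            by_cases h3 : 3 ≤ (t : Int) + 1
            · have h3' : 3 ≤ 1 + (t : Int) := by omega
              simp only [if_pos h3, if_pos h3']
              have : i + 1 + (t : Int) - 1 = i + ((t : Int) + 1) - 1 := by ring
              simp [this]
            · have h3' : ¬ 3 ≤ 1 + (t : Int) := by omega
              simp [h3, h3']
          · rw [pvALoop]
            simp only [h, Bool.false_eq_true, if_neg, not_false_iff]
            have hrec : pvALoop rest (i + 1) = pvWrap (i + 1) (pvGo rest (i + 1)) :=
              ih rest.length (by simp [← hlen]) _ _ rfl
            rw [hrec]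
            simp only [pvGo, h, Bool.false_eq_true, if_neg, not_false_iff, pvWrap]
            by_cases h3 : 3 ≤ (pvGo rest (i + 1)).1
            · simp only [h3, if_pos]
              have : i + 1 + (pvGo rest (i + 1)).1 - 1 = i + (pvGo rest (i + 1)).1 := by ring
              simp [this]
            · simp [h3]

-- ===== VERDICT (by name: the statement is the Claim_ definition above) =====
theorem find_pipe_block_tables_spec : Claim_equal_find_pipe_block_tables := by
  intro lines _
  unfold Spec_find_pipe_block_tables find_pipe_block_tables find_pipe_block_tables_alt
  rw [pvALoop_eq_go lines.length lines 0 rfl, pvBGo_eq]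
  by_cases h3 : 3 ≤ (pvGo lines 0).1
  · simp [pvWrap, h3]
  · simp [pvWrap, h3]
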